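-- pv_equiv track=rewrite | github.com/SilviaJoJo/CS61A | exams/61a-su20-mt/q6/q6.py | copycat
-- ===== SOURCE A (Python) =====
-- def copycat(lst1, lst2):
--     """
--     Write a function `copycat` that takes in two lists.
--         `lst1` is a list of strings
--         `lst2` is a list of integers
--
--     It returns a new list where every element from `lst1` is copied the
--     number of times as the corresponding element in `lst2`. If the number
--     of times to be copied is negative (-k), then it removes the previous
--     k elements added.
--
--     Note 1: `lst1` and `lst2` do not have to be the same length, simply ignore
--     any extra elements in the longer list.
--
--     Note 2: you can assume that you will never be asked to delete more
--     elements than exist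
--
--
--     >>> copycat(['a', 'b', 'c'], [1, 2, 3])
--     ['a', 'b', 'b', 'c', 'c', 'c']
--     >>> copycat(['a', 'b', 'c'], [3])
--     ['a', 'a', 'a']
--     >>> copycat(['a', 'b', 'c'], [0, 2, 0])
--     ['b', 'b']
--     >>> copycat([], [1,2,3])
--     []
--     >>> copycat(['a', 'b', 'c'], [1, -1, 3])
--     ['c', 'c', 'c']
--     """
--     def copycat_helper(lst, index, limit):
--         if index == limit:
--             return lst
--         if lst2[index] >= 0:
--             lst = lst + [lst1[index] for _ in range(lst2[index])]
--         else:
--             lst = lst[:lst2[index]]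
--         return copycat_helper(lst, index + 1, limit)
--     return copycat_helper([], 0, min(len(lst1), len(lst2)))
-- ===== SOURCE B (Python) =====
-- def copycat(lst1, lst2):
--     result = []
--     for s, n in zip(lst1, lst2):
--         if n >= 0:
--             result.extend([s] * n)
--         else:
--             del result[n:]
--     return result
-- ===== Notes on version B (the rewrite author's own statement) =====
-- stated objective: faster
-- what changed: Replaced the recursive index-based helper that rebuilds the whole list by concatenation/slicing at every step with one flat iterative loop over zip(lst1, lst2) mutating a single result list via extend / del.
import Mathlib
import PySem

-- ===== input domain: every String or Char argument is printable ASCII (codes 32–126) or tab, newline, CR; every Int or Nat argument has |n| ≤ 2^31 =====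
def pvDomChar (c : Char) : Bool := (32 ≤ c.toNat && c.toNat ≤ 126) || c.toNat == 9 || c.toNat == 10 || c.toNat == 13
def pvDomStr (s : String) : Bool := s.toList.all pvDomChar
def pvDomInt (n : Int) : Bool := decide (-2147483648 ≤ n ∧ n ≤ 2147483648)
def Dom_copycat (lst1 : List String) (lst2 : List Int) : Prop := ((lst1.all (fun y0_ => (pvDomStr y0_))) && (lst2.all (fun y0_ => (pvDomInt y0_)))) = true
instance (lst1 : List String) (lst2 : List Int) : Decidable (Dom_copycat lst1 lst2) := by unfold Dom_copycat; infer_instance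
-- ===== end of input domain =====

-- B replaces A's recursive index helper (repeated concatenation/slicing) with one flat fold over zip(lst1, lst2); return values proved equal on all inputs.


-- ===== PORT A =====
-- A's inner helper: recursion on `index` up to `limit`, made total with a fuel counter
-- (fuel = limit - index at every call, so the fuel-0 branch is never reached);
-- `lst2[index]`/`lst1[index]` are always in range (index < limit = min of the lengths),
-- ported as pyGetD with an unused default.
def copycatHelper (lst1 : List String) (lst2 : List Int) (fuel : Nat)
    (lst : List String) (index limit : Nat) : List String :=
  match fuel with
  | 0 => lst
  | fuel + 1 =>
    if index = limit then lst
    else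
      let lst' :=
        if 0 ≤ PySem.List.pyGetD lst2 (index : Int) 0 then
          lst ++ (PySem.List.pyRange 0 (PySem.List.pyGetD lst2 (index : Int) 0) 1).map
            (fun _ => PySem.List.pyGetD lst1 (index : Int) "")
        else
          PySem.List.slice lst none (some (PySem.List.pyGetD lst2 (index : Int) 0))
      copycatHelper lst1 lst2 fuel lst' (index + 1) limit

def copycat (lst1 : List String) (lst2 : List Int) : List String :=
  copycatHelper lst1 lst2 (min lst1.length lst2.length) [] 0 (min lst1.length lst2.length)

-- ===== PORT B =====
def copycat_alt (lst1 : List String) (lst2 : List Int) : List String :=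
  (lst1.zip lst2).foldl
    (fun result sn =>
      if 0 ≤ sn.2 then result ++ List.replicate sn.2.toNat sn.1
      else PySem.List.slice result none (some sn.2))
    []

-- ===== PRECONDITION & SPEC =====
def Spec_copycat (lst1 : List String) (lst2 : List Int) (out : List String) : Prop := out = copycat_alt lst1 lst2
instance (lst1 : List String) (lst2 : List Int) (out : List String) : Decidable (Spec_copycat lst1 lst2 out) := by unfold Spec_copycat; infer_instance

-- ===== CLAIM (what is proved, stated in full; the proofs are below) =====
def Claim_equal_copycat : Prop := ∀ (lst1 : List String) (lst2 : List Int), Dom_copycat lst1 lst2 → Spec_copycat lst1 lst2 (copycat lst1 lst2)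

-- ===== LEMMAS AND PROOFS =====

lemma copycat_step (lst1 : List String) (lst2 : List Int) (index : Nat)
    (h1 : index < lst1.length) (h2 : index < lst2.length) (lst : List String) :
    (if 0 ≤ PySem.List.pyGetD lst2 (index : Int) 0 then
        lst ++ (PySem.List.pyRange 0 (PySem.List.pyGetD lst2 (index : Int) 0) 1).map
          (fun _ => PySem.List.pyGetD lst1 (index : Int) "")
      else
        PySem.List.slice lst none (some (PySem.List.pyGetD lst2 (index : Int) 0)))
    = (if 0 ≤ lst2[index] then lst ++ List.replicate lst2[index].toNat lst1[index]
       else PySem.List.slice lst none (some lst2[index])) := by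
  rw [PySem.List.pyGetD_natCast, PySem.List.pyGetD_natCast,
    List.getD_eq_getElem lst2 0 h2, List.getD_eq_getElem lst1 "" h1]
  by_cases hn : 0 ≤ lst2[index]
  · rw [if_pos hn, if_pos hn]
    have hmap : (PySem.List.pyRange 0 lst2[index] 1).map (fun _ => lst1[index])
        = List.replicate lst2[index].toNat lst1[index] := by
      rw [List.map_const']
      congr 1
      rw [PySem.List.length_pyRange_one]
      omega
    rw [hmap]
  · rw [if_neg hn, if_neg hn]

lemma copycat_helper_eq_foldl (lst1 : List String) (lst2 : List Int) (fuel : Nat) :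
    ∀ (index : Nat) (lst : List String),
      fuel = min lst1.length lst2.length - index →
      index ≤ min lst1.length lst2.length →
      copycatHelper lst1 lst2 fuel lst index (min lst1.length lst2.length)
      = ((lst1.zip lst2).drop index).foldl
          (fun result sn =>
            if 0 ≤ sn.2 then result ++ List.replicate sn.2.toNat sn.1
            else PySem.List.slice result none (some sn.2)) lst := by
  induction fuel with
  | zero =>
    intro index lst hf hle
    have : index = min lst1.length lst2.length := by omega
    subst this
    simp [copycatHelper, List.drop_eq_nil_of_le, List.length_zip]
  | succ fuel ih =>
    intro index lst hf hle
    have hne : index ≠ min lst1.length lst2.length := by omega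
    have h1 : index < lst1.length := by omega
    have h2 : index < lst2.length := by omega
    have hz : index < (lst1.zip lst2).length := by simp [List.length_zip]; omega
    rw [copycatHelper]
    simp only [hne, if_neg, not_false_iff]
    rw [ih (index + 1) _ (by omega) (by omega)]
    rw [List.drop_eq_getElem_cons hz, List.foldl_cons, List.getElem_zip]
    rw [copycat_step lst1 lst2 index h1 h2]

-- ===== VERDICT (by name: the statement is the Claim_ definition above) =====
theorem copycat_spec : Claim_equal_copycat := by
  intro lst1 lst2 _
  show copycat lst1 lst2 = copycat_alt lst1 lst2
  unfold copycat copycat_alt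
  simpa using copycat_helper_eq_foldl lst1 lst2 (min lst1.length lst2.length) 0 [] (by omega) (by omega)
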